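-- pv_equiv track=rewrite | github.com/Adrivea/connectif-bot | build_index.py | _find_sentence_break
-- ===== SOURCE A (Python) =====
-- def _find_sentence_break(text, target, window=100):
--     """Busca el corte de oracion mas cercano a 'target' dentro de una ventana."""
--     best = target
--     # Buscar hacia atras desde target
--     search_start = max(0, target - window)
--     for i in range(target, search_start, -1):
--         if i < len(text) and text[i - 1] in ".!?\n" and (i >= len(text) or text[i] in " \n\t\r"):
--             best = i
--             break
--     return best
-- ===== SOURCE B (Python) =====
-- def _find_sentence_break(text, target, window=100):
--     """Busca el corte de oracion mas cercano a 'target' dentro de una ventana."""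
--     search_start = max(0, target - window)
--     best = target
--     for pos, (prev, nxt) in enumerate(zip(text, text[1:]), 1):
--         if search_start < pos <= target and prev in ".!?\n" and nxt in " \n\t\r":
--             best = pos
--     return best
-- ===== Notes on version B (the rewrite author's own statement) =====
-- stated objective: alternative
-- what changed: A scans indices backward from target with an early break; B makes one forward pass over the adjacent character pairs zip(text, text[1:]) with an overwriting accumulator, so the last in-window break (the nearest to target) wins and indexing disappears.
import Mathlib
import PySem

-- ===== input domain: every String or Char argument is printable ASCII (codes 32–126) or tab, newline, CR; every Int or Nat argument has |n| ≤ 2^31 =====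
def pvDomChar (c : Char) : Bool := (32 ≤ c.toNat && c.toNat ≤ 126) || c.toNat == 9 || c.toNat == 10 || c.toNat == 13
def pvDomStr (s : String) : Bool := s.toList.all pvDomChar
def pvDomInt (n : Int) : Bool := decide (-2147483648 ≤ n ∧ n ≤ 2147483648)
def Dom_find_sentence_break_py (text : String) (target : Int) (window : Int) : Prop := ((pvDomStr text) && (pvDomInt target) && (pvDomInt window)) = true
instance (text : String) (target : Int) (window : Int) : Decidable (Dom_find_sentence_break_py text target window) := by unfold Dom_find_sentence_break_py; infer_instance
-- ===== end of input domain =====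

-- B replaces A's backward index scan with early break by a single forward pass over
-- the adjacent character pairs zip(text, text[1:]), overwriting the accumulator so the
-- last (= nearest) in-window break wins (objective: alternative; not faster).

-- ===== PORT A =====
-- c in ".!?\n"  /  c in " \n\t\r"  (char-in-string membership, written as equality chains)
def pvIsEnd (c : Char) : Bool := c = '.' || c = '!' || c = '?' || c = '\n'
def pvIsWs (c : Char) : Bool := c = ' ' || c = '\n' || c = '\t' || c = '\r'

-- A's loop condition: i < len(text) and text[i-1] in ".!?\n" and (i >= len(text) or text[i] in " \n\t\r")
-- (the indexings are guarded by the condition itself, so `.any` never hides an IndexError)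
def pvCondA (cs : List Char) (i : Int) : Bool :=
  decide (i < (cs.length : Int)) &&
  (PySem.List.pyGet? cs (i - 1)).any pvIsEnd &&
  (decide ((cs.length : Int) ≤ i) || (PySem.List.pyGet? cs i).any pvIsWs)

def find_sentence_break_py (text : String) (target : Int) (window : Int) : Int :=
  let cs := text.toList
  let best := target
  let search_start := max 0 (target - window)
  -- for i in range(target, search_start, -1): if cond: best = i; break
  match (PySem.List.pyRange target search_start (-1)).find? (pvCondA cs) with
  | some i => i
  | none => best

-- ===== PORT B =====
-- B's loop-body test: search_start < pos <= target and prev in ".!?\n" and nxt in " \n\t\r"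
def pvHit (lo target : Int) (pr : Int × Char × Char) : Bool :=
  decide (lo < pr.1) && decide (pr.1 ≤ target) && pvIsEnd pr.2.1 && pvIsWs pr.2.2

def find_sentence_break_py_alt (text : String) (target : Int) (window : Int) : Int :=
  let cs := text.toList
  let search_start := max 0 (target - window)
  -- for pos, (prev, nxt) in enumerate(zip(text, text[1:]), 1): if hit: best = pos
  (PySem.List.enumerate (cs.zip (PySem.List.slice cs (some 1) none)) 1).foldl
    (fun best pr => if pvHit search_start target pr then pr.1 else best) target

-- ===== PRECONDITION & SPEC =====
def Spec_find_sentence_break_py (text : String) (target : Int) (window : Int) (out : Int) : Prop := out = find_sentence_break_py_alt text target window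
instance (text : String) (target : Int) (window : Int) (out : Int) : Decidable (Spec_find_sentence_break_py text target window out) := by unfold Spec_find_sentence_break_py; infer_instance

-- ===== CLAIM (what is proved, stated in full; the proofs are below) =====
def Claim_equal_find_sentence_break_py : Prop := ∀ (text : String) (target : Int) (window : Int), Dom_find_sentence_break_py text target window → Spec_find_sentence_break_py text target window (find_sentence_break_py text target window)

-- ===== LEMMAS AND PROOFS =====

-- An overwriting fold returns the last hit, i.e. the first hit of the reversed list.
theorem pv_foldl_overwrite {α : Type} (p : α → Bool) (f : α → Int) (L : List α) (init : Int) :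
    L.foldl (fun acc x => if p x then f x else acc) init =
      (match L.reverse.find? p with | some x => f x | none => init) := by
  induction L generalizing init with
  | nil => simp
  | cons a t ih =>
    simp only [List.foldl_cons, List.reverse_cons, List.find?_append, ih]
    cases h : t.reverse.find? p with
    | some x => simp
    | none =>
      by_cases hpa : p a = true
      · simp [List.find?, hpa]
      · simp [List.find?, hpa]

-- On a list whose key is strictly descending, find? returns the hit with the greatest key …
theorem pv_find?_key_desc {α : Type} (key : α → Int) (p : α → Bool) (L : List α)
    (h : L.Pairwise (fun a b => key b < key a))
    (x : α) (hx : x ∈ L) (hpx : p x = true)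
    (hmax : ∀ y ∈ L, p y = true → key y ≤ key x) :
    L.find? p = some x := by
  induction L with
  | nil => cases hx
  | cons a t ih =>
    rcases List.pairwise_cons.mp h with ⟨ha, ht⟩
    by_cases hpa : p a = true
    · have hax : key a ≤ key x := hmax a List.mem_cons_self hpa
      have : x = a := by
        rcases List.mem_cons.mp hx with rfl | hxt
        · rfl
        · exact absurd (ha x hxt) (by omega)
      subst this
      simp [List.find?, hpa]
    · have hxt : x ∈ t := by
        rcases List.mem_cons.mp hx with rfl | hxt
        · exact absurd hpx hpa
        · exact hxt
      have := ih ht hxt (fun y hy => hmax y (List.mem_cons_of_mem a hy))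
      simp [List.find?, hpa, this]

-- … and conversely any find? hit on such a list carries the greatest key among hits.
theorem pv_find?_desc_max {α : Type} (key : α → Int) (p : α → Bool) (L : List α)
    (h : L.Pairwise (fun a b => key b < key a))
    (x : α) (hf : L.find? p = some x) :
    x ∈ L ∧ p x = true ∧ ∀ y ∈ L, p y = true → key y ≤ key x := by
  induction L with
  | nil => simp [List.find?] at hf
  | cons a t ih =>
    rcases List.pairwise_cons.mp h with ⟨ha, ht⟩
    by_cases hpa : p a = true
    · have : a = x := by simpa [List.find?, hpa] using hf
      subst this
      refine ⟨List.mem_cons_self, hpa, ?_⟩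
      intro y hy _
      rcases List.mem_cons.mp hy with rfl | hyt
      · exact le_refl _
      · exact le_of_lt (ha y hyt)
    · have hf' : t.find? p = some x := by simpa [List.find?, hpa] using hf
      obtain ⟨hm, hp, hmax⟩ := ih ht hf'
      refine ⟨List.mem_cons_of_mem a hm, hp, ?_⟩
      intro y hy hpy
      rcases List.mem_cons.mp hy with rfl | hyt
      · exact absurd hpy hpa
      · exact hmax y hyt hpy

-- A's countdown range is strictly descending.
theorem pv_range_desc (a b : Int) : (PySem.List.pyRange a b (-1)).Pairwise (fun x y => y < x) := by
  rw [PySem.List.pyRange_neg_one_eq_reverse]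
  exact (List.pairwise_reverse).mpr (PySem.List.pairwise_lt_pyRange_one (b + 1) (a + 1))

-- The reversed pair enumeration has strictly descending positions.
theorem pv_enum_desc {α : Type} (xs : List α) (s : Int) :
    ((PySem.List.enumerate xs s).reverse).Pairwise
      (fun a b : Int × α => b.1 < a.1) := by
  exact (List.pairwise_reverse).mpr (PySem.List.pairwise_lt_enumerate xs s)

-- A B-hit pair yields an A-hit index.
theorem pv_hit_to_cond (cs : List Char) (lo target : Int)
    (pr : Int × Char × Char)
    (hm : pr ∈ (PySem.List.enumerate (cs.zip cs.tail) 1).reverse)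
    (hh : pvHit lo target pr = true) :
    pr.1 ∈ PySem.List.pyRange target lo (-1) ∧ pvCondA cs pr.1 = true := by
  rw [List.mem_reverse] at hm
  rw [PySem.List.mem_enumerate_iff] at hm
  obtain ⟨k, hk, hpr⟩ := hm
  have hklen : k + 1 < cs.length := by
    have := hk
    simp [List.length_zip, List.length_tail] at this
    omega
  have hz : (cs.zip cs.tail)[k] = (cs[k]'(by omega), cs[k+1]'hklen) := by
    have ht : cs.tail[k]'(by simp [List.length_tail]; omega) = cs[k+1]'hklen := by
      simp [List.getElem_tail]
    simp [List.getElem_zip, ht]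
  unfold pvHit at hh
  simp only [Bool.and_eq_true, decide_eq_true_eq] at hh
  obtain ⟨⟨⟨h1, h2⟩, hend⟩, hws⟩ := hh
  subst hpr
  simp only [hz] at hend hws ⊢
  constructor
  · rw [PySem.List.mem_pyRange_neg_one]
    exact ⟨h1, h2⟩
  · unfold pvCondA
    simp only [Bool.and_eq_true, Bool.or_eq_true, decide_eq_true_eq]
    refine ⟨⟨by omega, ?_⟩, Or.inr ?_⟩
    · have : (1 + (k : Int)) - 1 = ((k : Nat) : Int) := by omega
      rw [this, PySem.List.pyGet?_natCast]
      simp [List.getElem?_eq_getElem (by omega : k < cs.length), hend]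
    · have : (1 + (k : Int)) = (((k + 1 : Nat)) : Int) := by omega
      rw [this, PySem.List.pyGet?_natCast]
      simp [List.getElem?_eq_getElem hklen, hws]

-- An A-hit index yields a B-hit pair at the same position.
theorem pv_cond_to_hit (cs : List Char) (lo target i : Int) (hlo : 0 ≤ lo)
    (hm : i ∈ PySem.List.pyRange target lo (-1)) (hc : pvCondA cs i = true) :
    ∃ pr ∈ (PySem.List.enumerate (cs.zip cs.tail) 1).reverse,
      pr.1 = i ∧ pvHit lo target pr = true := by
  rw [PySem.List.mem_pyRange_neg_one] at hm
  obtain ⟨h1, h2⟩ := hm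
  unfold pvCondA at hc
  simp only [Bool.and_eq_true, Bool.or_eq_true, decide_eq_true_eq] at hc
  obtain ⟨⟨hilen, hend⟩, hws⟩ := hc
  have hws' : (PySem.List.pyGet? cs i).any pvIsWs = true := by
    rcases hws with h | h
    · omega
    · exact h
  have hi1 : 1 ≤ i := by omega
  set k : Nat := (i - 1).toNat with hkdef
  have hik : i = 1 + (k : Int) := by omega
  have hklen : k + 1 < cs.length := by
    have : i < (cs.length : Int) := hilen
    omega
  have hzlen : k < (cs.zip cs.tail).length := by
    simp [List.length_zip, List.length_tail]
    omega
  refine ⟨(1 + (k : Int), (cs.zip cs.tail)[k]), ?_, ?_, ?_⟩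
  · rw [List.mem_reverse, PySem.List.mem_enumerate_iff]
    exact ⟨k, hzlen, rfl⟩
  · omega
  · have hz : (cs.zip cs.tail)[k] = (cs[k]'(by omega), cs[k+1]'hklen) := by
      have ht : cs.tail[k]'(by simp [List.length_tail]; omega) = cs[k+1]'hklen := by
        simp [List.getElem_tail]
      simp [List.getElem_zip, ht]
    have hend' : pvIsEnd (cs[k]'(by omega)) = true := by
      have : i - 1 = ((k : Nat) : Int) := by omega
      rw [this, PySem.List.pyGet?_natCast] at hend
      simpa [List.getElem?_eq_getElem (by omega : k < cs.length)] using hend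
    have hws'' : pvIsWs (cs[k+1]'hklen) = true := by
      have : i = (((k + 1 : Nat)) : Int) := by omega
      rw [this, PySem.List.pyGet?_natCast] at hws'
      simpa [List.getElem?_eq_getElem hklen] using hws'
    unfold pvHit
    simp only [hz, Bool.and_eq_true, decide_eq_true_eq]
    exact ⟨⟨⟨by omega, by omega⟩, hend'⟩, hws''⟩

-- ===== VERDICT (by name: the statement is the Claim_ definition above) =====
theorem find_sentence_break_py_spec : Claim_equal_find_sentence_break_py := by
  intro text target window _
  unfold Spec_find_sentence_break_py
  simp only [find_sentence_break_py, find_sentence_break_py_alt, PySem.List.slice_from_one]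
  set cs := text.toList with hcs
  set lo := max 0 (target - window) with hlo
  have hlo0 : 0 ≤ lo := le_max_left _ _
  rw [pv_foldl_overwrite]
  match hA : (PySem.List.pyRange target lo (-1)).find? (pvCondA cs) with
  | some i =>
    obtain ⟨hmI, hpI, hmaxI⟩ := pv_find?_desc_max id (pvCondA cs) _ (pv_range_desc target lo) i hA
    obtain ⟨pr, hprm, hpr1, hprh⟩ := pv_cond_to_hit cs lo target i hlo0 hmI hpI
    have hB : ((PySem.List.enumerate (cs.zip cs.tail) 1).reverse).find? (pvHit lo target)
        = some pr := by
      apply pv_find?_key_desc (fun q => q.1) _ _ (pv_enum_desc _ _) pr hprm hprh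
      intro q hq hpq
      obtain ⟨hq1, hq2⟩ := pv_hit_to_cond cs lo target q hq hpq
      have := hmaxI q.1 hq1 hq2
      simp only [id] at this
      omega
    simp [hB, hpr1]
  | none =>
    have hB : ((PySem.List.enumerate (cs.zip cs.tail) 1).reverse).find? (pvHit lo target)
        = none := by
      rw [List.find?_eq_none]
      intro q hq hpq
      obtain ⟨hq1, hq2⟩ := pv_hit_to_cond cs lo target q hq hpq
      have := List.find?_eq_none.mp hA q.1 hq1
      exact this hq2
    simp [hB]
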